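-- pv_equiv track=rewrite | github.com/FarukNetworks/modernization-tool | app/shared/run_sql_tests.py | naive_linechunk
-- ===== SOURCE A (Python) =====
-- def naive_linechunk(sql_script):
--     """Split SQL script into GO-separated batches with improved handling"""
--     batches = []
--     current_batch = []
--
--     for line in sql_script.splitlines():
--         stripped_line = line.strip()
--         if stripped_line.upper() == "GO":
--             batches.append("\n".join(current_batch))
--             current_batch = []
--         else:
--             current_batch.append(line)
--
--     if current_batch:
--         batches.append("\n".join(current_batch))
--
--     return [batch.strip() for batch in batches if batch.strip()]
-- ===== SOURCE B (Python) =====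
-- def naive_linechunk(sql_script):
--     """Split SQL script into GO-separated batches: index scan, one inner scan per batch."""
--     lines = sql_script.splitlines()
--     n = len(lines)
--     batches = []
--     i = 0
--     while i < n:
--         j = i
--         while j < n and lines[j].strip().upper() != "GO":
--             j += 1
--         batch = "\n".join(lines[i:j]).strip()
--         if batch:
--             batches.append(batch)
--         i = j + 1
--     return batches
-- ===== Notes on version B (the rewrite author's own statement) =====
-- stated objective: alternative
-- what changed: Replaced the accumulate-and-flush loop plus a final strip/filter comprehension with a nested index scan that finds each GO delimiter, slices the run lines[i:j], and strips/filters each batch inline as it is produced.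
import Mathlib
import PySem

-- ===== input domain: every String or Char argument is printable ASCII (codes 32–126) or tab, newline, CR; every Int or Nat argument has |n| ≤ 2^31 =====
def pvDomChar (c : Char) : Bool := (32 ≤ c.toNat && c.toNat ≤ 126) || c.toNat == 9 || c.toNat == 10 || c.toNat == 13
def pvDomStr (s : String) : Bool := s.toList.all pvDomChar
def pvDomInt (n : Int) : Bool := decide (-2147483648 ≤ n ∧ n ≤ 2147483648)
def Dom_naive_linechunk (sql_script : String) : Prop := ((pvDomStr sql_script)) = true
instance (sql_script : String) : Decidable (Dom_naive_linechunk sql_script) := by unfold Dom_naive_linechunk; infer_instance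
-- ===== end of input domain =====

-- B replaces A's accumulate-and-flush loop (plus final strip/filter pass) with a nested
-- index scan that slices out each GO-delimited run and strips/filters it inline (alternative, same cost).

-- ===== PORT A =====
def naive_linechunk (sql_script : String) : List String :=
  let st := (PySem.Str.splitlines sql_script).foldl
    (fun (st : List String × List String) (line : String) =>
      let stripped_line := PySem.Str.strip line
      if PySem.Str.upper stripped_line == "GO" then
        (st.1 ++ [PySem.Str.join "\n" st.2], [])
      else
        (st.1, st.2 ++ [line]))
    ([], [])
  let batches := if st.2 ≠ [] then st.1 ++ [PySem.Str.join "\n" st.2] else st.1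
  (batches.filter (fun batch => PySem.Str.strip batch != "")).map (fun batch => PySem.Str.strip batch)

-- ===== PORT B =====
def pvIsGo (line : String) : Bool := PySem.Str.upper (PySem.Str.strip line) == "GO"

-- inner while loop of Source B: advance j while j < n and lines[j] is not a GO marker
def pvFindGo (lines : List String) (j : Nat) : Nat :=
  if h : j < lines.length then
    if pvIsGo lines[j] then j else pvFindGo lines (j + 1)
  else j
termination_by lines.length - j

-- termination fact the outer loop cites: the inner scan never moves backwards
theorem le_pvFindGo (lines : List String) (j : Nat) : j ≤ pvFindGo lines j := by
  fun_induction pvFindGo lines j with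
  | case1 j _ _ => exact le_refl j
  | case2 j _ _ ih => omega
  | case3 j _ => exact le_refl j

-- outer while loop of Source B
def pvLoop (lines : List String) (i : Nat) (batches : List String) : List String :=
  if h : i < lines.length then
    let j := pvFindGo lines i
    let batch := PySem.Str.strip (PySem.Str.join "\n"
      (PySem.List.slice lines (some (i : Int)) (some (j : Int))))
    pvLoop lines (j + 1) (if batch != "" then batches ++ [batch] else batches)
  else batches
termination_by lines.length - i
decreasing_by have := le_pvFindGo lines i; omega

def naive_linechunk_alt (sql_script : String) : List String :=
  pvLoop (PySem.Str.splitlines sql_script) 0 []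

-- ===== PRECONDITION & SPEC =====
def Spec_naive_linechunk (sql_script : String) (out : List String) : Prop := out = naive_linechunk_alt sql_script
instance (sql_script : String) (out : List String) : Decidable (Spec_naive_linechunk sql_script out) := by unfold Spec_naive_linechunk; infer_instance

-- ===== CLAIM (what is proved, stated in full; the proofs are below) =====
def Claim_equal_naive_linechunk : Prop := ∀ (sql_script : String), Dom_naive_linechunk sql_script → Spec_naive_linechunk sql_script (naive_linechunk sql_script)

-- ===== LEMMAS AND PROOFS =====

-- the joined batches A's loop produces, starting from pending run `cur`
def runsJ (cur : List String) : List String → List String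
  | [] => if cur ≠ [] then [PySem.Str.join "\n" cur] else []
  | l :: ls => if pvIsGo l then PySem.Str.join "\n" cur :: runsJ [] ls else runsJ (cur ++ [l]) ls

-- A's final comprehension
def postS (bs : List String) : List String :=
  (bs.filter (fun b => PySem.Str.strip b != "")).map (fun b => PySem.Str.strip b)

-- the batches B produces, run by run
def bRuns (ls : List String) : List String :=
  let t := ls.takeWhile (fun l => !pvIsGo l)
  let batch := PySem.Str.strip (PySem.Str.join "\n" t)
  let rest := ls.drop t.length
  (if batch != "" then [batch] else []) ++
    (if h : rest = [] then [] else bRuns rest.tail)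
termination_by ls.length
decreasing_by
  have hne : ls ≠ [] := by
    intro e
    apply h
    subst e
    rfl
  have h0 : 0 < ls.length := List.length_pos_of_ne_nil hne
  have h1 : (ls.drop (ls.takeWhile (fun l => !pvIsGo l)).length).tail.length
      = ls.length - (ls.takeWhile (fun l => !pvIsGo l)).length - 1 := by
    simp [List.length_drop]
    omega
  omega

theorem bRuns_nil : bRuns [] = [] := by
  rw [bRuns]; decide

theorem runsJ_foldl (ls : List String) : ∀ (acc cur : List String),
    (if (ls.foldl
          (fun (st : List String × List String) (line : String) =>
            let stripped_line := PySem.Str.strip line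
            if PySem.Str.upper stripped_line == "GO" then
              (st.1 ++ [PySem.Str.join "\n" st.2], [])
            else
              (st.1, st.2 ++ [line]))
          (acc, cur)).2 ≠ [] then
       (ls.foldl
          (fun (st : List String × List String) (line : String) =>
            let stripped_line := PySem.Str.strip line
            if PySem.Str.upper stripped_line == "GO" then
              (st.1 ++ [PySem.Str.join "\n" st.2], [])
            else
              (st.1, st.2 ++ [line]))
          (acc, cur)).1 ++
         [PySem.Str.join "\n"
           (ls.foldl
              (fun (st : List String × List String) (line : String) =>
                let stripped_line := PySem.Str.strip line
                if PySem.Str.upper stripped_line == "GO" then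
                  (st.1 ++ [PySem.Str.join "\n" st.2], [])
                else
                  (st.1, st.2 ++ [line]))
              (acc, cur)).2]
     else
       (ls.foldl
          (fun (st : List String × List String) (line : String) =>
            let stripped_line := PySem.Str.strip line
            if PySem.Str.upper stripped_line == "GO" then
              (st.1 ++ [PySem.Str.join "\n" st.2], [])
            else
              (st.1, st.2 ++ [line]))
          (acc, cur)).1)
    = acc ++ runsJ cur ls := by
  induction ls with
  | nil => intro acc cur; by_cases h : cur = [] <;> simp [runsJ, h]
  | cons l ls ih =>
    intro acc cur
    by_cases h : (PySem.Str.upper (PySem.Str.strip l) == "GO") = true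
    · simp only [List.foldl_cons, h, if_pos]
      rw [ih (acc ++ [PySem.Str.join "\n" cur]) []]
      have : runsJ cur (l :: ls) = PySem.Str.join "\n" cur :: runsJ [] ls := by
        simp [runsJ, pvIsGo, h]
      rw [this]; simp
    · simp only [List.foldl_cons, h, Bool.false_eq_true, if_false]
      rw [ih acc (cur ++ [l])]
      have : runsJ cur (l :: ls) = runsJ (cur ++ [l]) ls := by
        simp [runsJ, pvIsGo, h]
      rw [this]

theorem postS_cons (x : String) (xs : List String) :
    postS (x :: xs) = (if PySem.Str.strip x != "" then [PySem.Str.strip x] else []) ++ postS xs := by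
  by_cases h : PySem.Str.strip x = "" <;> simp [postS, h]

-- chunk-style characterization of runsJ
theorem runsJ_chunk (ls : List String) : ∀ cur : List String,
    runsJ cur ls =
      (match ls.drop (ls.takeWhile (fun l => !pvIsGo l)).length with
       | [] =>
         if cur ++ ls.takeWhile (fun l => !pvIsGo l) ≠ [] then
           [PySem.Str.join "\n" (cur ++ ls.takeWhile (fun l => !pvIsGo l))]
         else []
       | _ :: rs => PySem.Str.join "\n" (cur ++ ls.takeWhile (fun l => !pvIsGo l)) :: runsJ [] rs) := by
  induction ls with
  | nil => intro cur; simp [runsJ]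
  | cons l ls ih =>
    intro cur
    by_cases h : pvIsGo l
    · simp [runsJ, h]
    · simp only [runsJ, h, Bool.false_eq_true, if_neg, List.takeWhile_cons, Bool.not_false,
        if_true, List.length_cons, List.drop_succ_cons, not_false_eq_true]
      rw [ih (cur ++ [l])]
      simp

theorem strip_join_nil : PySem.Str.strip (PySem.Str.join "\n" ([] : List String)) = "" := by decide

theorem postS_runsJ (n : Nat) : ∀ ls : List String, ls.length ≤ n → postS (runsJ [] ls) = bRuns ls := by
  induction n with
  | zero =>
    intro ls h
    have : ls = [] := List.eq_nil_of_length_eq_zero (Nat.le_zero.mp h)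
    subst this
    rw [bRuns_nil]; simp [runsJ, postS]
  | succ n ih =>
    intro ls hlen
    rw [runsJ_chunk, bRuns]
    simp only [List.nil_append]
    cases hrest : ls.drop (ls.takeWhile (fun l => !pvIsGo l)).length with
    | nil =>
      by_cases hT : ls.takeWhile (fun l => !pvIsGo l) = []
      · rw [hT]; simp [postS, strip_join_nil]
      · rw [if_pos (by simp [hT])]
        by_cases hb : PySem.Str.strip (PySem.Str.join "\n" (ls.takeWhile (fun l => !pvIsGo l))) = ""
          <;> simp [postS, hb]
    | cons r rs =>
      rw [postS_cons]
      have hrs : rs.length ≤ n := by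
        have h1 : (ls.drop (ls.takeWhile (fun l => !pvIsGo l)).length).length ≤ ls.length := by
          simp [List.length_drop]
        rw [hrest] at h1; simp at h1; omega
      rw [ih rs hrs]
      simp

theorem pvFindGo_eq (lines : List String) (i : Nat) :
    pvFindGo lines i = i + ((lines.drop i).takeWhile (fun l => !pvIsGo l)).length := by
  fun_induction pvFindGo lines i with
  | case1 j h hg =>
    rw [List.drop_eq_getElem_cons h]
    simp [hg]
  | case2 j h hg ih =>
    rw [ih, List.drop_eq_getElem_cons h]
    simp only [List.takeWhile_cons, hg, Bool.not_false]
    simp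
    omega
  | case3 j h =>
    rw [List.drop_eq_nil_of_le (by omega)]
    simp

theorem pvLoop_eq (lines : List String) (n : Nat) : ∀ (i : Nat) (acc : List String),
    lines.length ≤ i + n → pvLoop lines i acc = acc ++ bRuns (lines.drop i) := by
  induction n with
  | zero =>
    intro i acc h
    rw [pvLoop, dif_neg (by omega), List.drop_eq_nil_of_le (by omega), bRuns_nil]
    simp
  | succ n ih =>
    intro i acc h
    by_cases hi : i < lines.length
    · rw [pvLoop, dif_pos hi]
      have hj : pvFindGo lines i = i + ((lines.drop i).takeWhile (fun l => !pvIsGo l)).length :=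
        pvFindGo_eq lines i
      have hslice : PySem.List.slice lines (some (i : Int))
            (some ((i + ((lines.drop i).takeWhile (fun l => !pvIsGo l)).length : Nat) : Int))
          = (lines.drop i).takeWhile (fun l => !pvIsGo l) := by
        rw [PySem.List.slice_natCast, Nat.add_sub_cancel_left]
        exact (List.prefix_iff_eq_take.mp (List.takeWhile_prefix _)).symm
      simp only [hj, hslice]
      rw [ih (i + ((lines.drop i).takeWhile (fun l => !pvIsGo l)).length + 1) _ (by omega)]
      conv_rhs => rw [bRuns]
      have hdd : (lines.drop i).drop ((lines.drop i).takeWhile (fun l => !pvIsGo l)).length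
          = lines.drop (i + ((lines.drop i).takeWhile (fun l => !pvIsGo l)).length) := by
        rw [List.drop_drop]
      cases hrest : lines.drop (i + ((lines.drop i).takeWhile (fun l => !pvIsGo l)).length) with
      | nil =>
        have hrest' : (lines.drop i).drop ((lines.drop i).takeWhile (fun l => !pvIsGo l)).length = [] := by
          rw [hdd, hrest]
        have hnil2 : lines.drop (i + ((lines.drop i).takeWhile (fun l => !pvIsGo l)).length + 1) = [] := by
          apply List.drop_eq_nil_of_le
          have := congrArg List.length hrest
          simp [List.length_drop] at this ⊢
          omega
        rw [hnil2, bRuns_nil, hrest']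
        by_cases hb : PySem.Str.strip (PySem.Str.join "\n" ((lines.drop i).takeWhile (fun l => !pvIsGo l))) = ""
          <;> simp [hb]
      | cons r rs =>
        have hrest' : (lines.drop i).drop ((lines.drop i).takeWhile (fun l => !pvIsGo l)).length = r :: rs := by
          rw [hdd, hrest]
        have hrs : lines.drop (i + ((lines.drop i).takeWhile (fun l => !pvIsGo l)).length + 1) = rs := by
          have h2 : lines.drop (i + ((lines.drop i).takeWhile (fun l => !pvIsGo l)).length + 1)
              = (lines.drop (i + ((lines.drop i).takeWhile (fun l => !pvIsGo l)).length)).drop 1 := by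
            rw [List.drop_drop]
          rw [h2, hrest]; rfl
        rw [hrs, hrest']
        by_cases hb : PySem.Str.strip (PySem.Str.join "\n" ((lines.drop i).takeWhile (fun l => !pvIsGo l))) = ""
          <;> simp [hb]
    · rw [pvLoop, dif_neg hi, List.drop_eq_nil_of_le (by omega), bRuns_nil]
      simp

theorem a_eq_postS (s : String) : naive_linechunk s = postS (runsJ [] (PySem.Str.splitlines s)) := by
  simp only [naive_linechunk]
  rw [runsJ_foldl (PySem.Str.splitlines s) [] []]
  simp [postS]

-- ===== VERDICT (by name: the statement is the Claim_ definition above) =====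
theorem naive_linechunk_spec : Claim_equal_naive_linechunk := by
  intro s _
  unfold Spec_naive_linechunk naive_linechunk_alt
  rw [a_eq_postS, pvLoop_eq (PySem.Str.splitlines s) (PySem.Str.splitlines s).length 0 [] (by omega)]
  simp
  exact postS_runsJ (PySem.Str.splitlines s).length _ (le_refl _)
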